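-- pv_equiv track=rewrite | github.com/KurisuNaotsugu/pymol_feature_paintor | src/converter/csv_loader.py | _row_to_canonical
-- ===== SOURCE A (Python) =====
-- _ALLOWED_COLUMNS = frozenset(
--     ("domain_name", "description", "start", "end", "chain", "color")
-- )
--
-- def _row_to_canonical(raw: dict[str, str]) -> dict[str, str]:
--     out: dict[str, str] = {k: "" for k in _ALLOWED_COLUMNS}
--     for k, v in raw.items():
--         if k is None:
--             continue
--         key = k.strip().lower()
--         if key in _ALLOWED_COLUMNS:
--             out[key] = (v or "").strip()
--     return out
-- ===== SOURCE B (Python) =====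
-- _ALLOWED_COLUMNS = frozenset(
--     ("domain_name", "description", "start", "end", "chain", "color")
-- )
--
-- def _row_to_canonical(raw: dict[str, str]) -> dict[str, str]:
--     # No accumulator dict: for each schema column, search raw back-to-front for the
--     # last item whose normalized key matches (first match in reverse = last-wins).
--     items = list(raw.items())
--     def find(col):
--         for k, v in reversed(items):
--             if k is not None and k.strip().lower() == col:
--                 return (v or "").strip()
--         return ""
--     return {col: find(col) for col in _ALLOWED_COLUMNS}
-- ===== Notes on version B (the rewrite author's own statement) =====
-- stated objective: alternative
-- what changed: B eliminates the mutable dict accumulator: instead of scanning raw once and overwriting entries of a pre-filled defaults dict, it performs, for each of the six fixed schema columns, a reverse linear search of the raw items for the first normalized-key match (reverse first-match reproduces last-wins), defaulting to ''.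
import Mathlib
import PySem

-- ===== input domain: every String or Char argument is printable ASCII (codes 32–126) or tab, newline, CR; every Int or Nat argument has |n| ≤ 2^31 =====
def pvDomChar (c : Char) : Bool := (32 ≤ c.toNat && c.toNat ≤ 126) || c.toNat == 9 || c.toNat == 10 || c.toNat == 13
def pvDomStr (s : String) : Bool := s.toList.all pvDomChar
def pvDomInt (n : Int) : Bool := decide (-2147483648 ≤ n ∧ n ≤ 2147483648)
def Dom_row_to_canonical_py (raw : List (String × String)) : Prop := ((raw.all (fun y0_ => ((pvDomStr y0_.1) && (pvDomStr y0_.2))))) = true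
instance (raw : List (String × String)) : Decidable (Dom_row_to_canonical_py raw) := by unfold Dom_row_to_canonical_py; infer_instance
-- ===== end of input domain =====

-- B drops A's mutable accumulator dict: for each of the six fixed schema columns it searches
-- the raw items back-to-front for the first normalized-key match (= A's last-wins), default "".
-- Keys are Strings here, so A's `if k is None: continue` branch never fires on this domain.

-- _ALLOWED_COLUMNS (frozenset literal; iteration order ported as the tuple order — dict outputs are compared ignoring order)
def pvAllowed : List String := ["domain_name", "description", "start", "end", "chain", "color"]

-- ===== PORT A =====
def row_to_canonical_py (raw : List (String × String)) : List (String × String) :=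
  -- out = {k: "" for k in _ALLOWED_COLUMNS}
  let out0 : PySem.Dict String String := pvAllowed.foldl (fun d k => d.insert k "") PySem.Dict.empty
  -- for k, v in raw.items(): key = k.strip().lower(); if key in _ALLOWED_COLUMNS: out[key] = (v or "").strip()
  (raw.foldl (fun d kv =>
      let key := PySem.Str.lower (PySem.Str.strip kv.1)
      if pvAllowed.contains key then
        d.insert key (PySem.Str.strip (if kv.2 = "" then "" else kv.2))
      else d) out0).items

-- ===== PORT B =====
-- def find(col): for k, v in reversed(items): if k.strip().lower() == col: return (v or "").strip(); return ""
def pvFind (col : String) : List (String × String) → String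
  | [] => ""
  | kv :: rest =>
      if PySem.Str.lower (PySem.Str.strip kv.1) = col then
        PySem.Str.strip (if kv.2 = "" then "" else kv.2)
      else pvFind col rest

def row_to_canonical_py_alt (raw : List (String × String)) : List (String × String) :=
  -- return {col: find(col) for col in _ALLOWED_COLUMNS}
  pvAllowed.map (fun col => (col, pvFind col raw.reverse))

-- ===== PRECONDITION & SPEC =====
def Spec_row_to_canonical_py (raw : List (String × String)) (out : List (String × String)) : Prop := out = row_to_canonical_py_alt raw
instance (raw : List (String × String)) (out : List (String × String)) : Decidable (Spec_row_to_canonical_py raw out) := by unfold Spec_row_to_canonical_py; infer_instance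

-- ===== CLAIM (what is proved, stated in full; the proofs are below) =====
def Claim_equal_row_to_canonical_py : Prop := ∀ (raw : List (String × String)), Dom_row_to_canonical_py raw → Spec_row_to_canonical_py raw (row_to_canonical_py raw)

-- ===== LEMMAS AND PROOFS =====

-- pvFind with an explicit default, used to run the reverse search by induction on the forward list.
def pvFindD (col : String) (l : List (String × String)) (dflt : String) : String :=
  match l with
  | [] => dflt
  | kv :: rest =>
      if PySem.Str.lower (PySem.Str.strip kv.1) = col then
        PySem.Str.strip (if kv.2 = "" then "" else kv.2)
      else pvFindD col rest dflt

theorem pvFindD_empty_default (col : String) (l : List (String × String)) :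
    pvFind col l = pvFindD col l "" := by
  induction l with
  | nil => rfl
  | cons kv rest ih => simp [pvFind, pvFindD, ih]

theorem pvFindD_append_singleton (col : String) (l : List (String × String)) (x : String × String) (dflt : String) :
    pvFindD col (l ++ [x]) dflt
      = pvFindD col l (if PySem.Str.lower (PySem.Str.strip x.1) = col then
          PySem.Str.strip (if x.2 = "" then "" else x.2) else dflt) := by
  induction l with
  | nil => simp [pvFindD]
  | cons kv rest ih => simp [pvFindD, ih]

-- The dict built by folding normalized insertions over raw looks up, per column,
-- exactly what the reverse first-match search finds.
theorem pv_getD_eq_findD (raw : List (String × String)) (d : PySem.Dict String String) (col : String) :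
    (raw.foldl (fun d kv =>
        d.insert (PySem.Str.lower (PySem.Str.strip kv.1))
                 (PySem.Str.strip (if kv.2 = "" then "" else kv.2))) d).getD col ""
    = pvFindD col raw.reverse (d.getD col "") := by
  induction raw generalizing d with
  | nil => rfl
  | cons kv rest ih =>
    simp only [List.foldl_cons, List.reverse_cons, pvFindD_append_singleton]
    rw [ih]
    have hd : (d.insert (PySem.Str.lower (PySem.Str.strip kv.1))
          (PySem.Str.strip (if kv.2 = "" then "" else kv.2))).getD col ""
        = (if PySem.Str.lower (PySem.Str.strip kv.1) = col then
            PySem.Str.strip (if kv.2 = "" then "" else kv.2) else d.getD col "") := by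
      by_cases h : PySem.Str.lower (PySem.Str.strip kv.1) = col
      · rw [if_pos h, ← h, PySem.Dict.getD_insert_self]
      · rw [if_neg h, PySem.Dict.getD_insert_of_ne _ _ _ (fun e => h e.symm)]
    rw [hd]

-- Loop invariant relating A's fold to the normalized-insert fold.
theorem pv_step (dA dB : PySem.Dict String String) (kv : String × String)
    (h : dA.items = pvAllowed.map (fun col => (col, dB.getD col ""))) :
    (let key := PySem.Str.lower (PySem.Str.strip kv.1)
     if pvAllowed.contains key then
       dA.insert key (PySem.Str.strip (if kv.2 = "" then "" else kv.2))
     else dA).items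
    = pvAllowed.map (fun col =>
        (col, (dB.insert (PySem.Str.lower (PySem.Str.strip kv.1))
                 (PySem.Str.strip (if kv.2 = "" then "" else kv.2))).getD col "")) := by
  show (if pvAllowed.contains (PySem.Str.lower (PySem.Str.strip kv.1)) then
       dA.insert (PySem.Str.lower (PySem.Str.strip kv.1)) (PySem.Str.strip (if kv.2 = "" then "" else kv.2))
     else dA).items = _
  generalize (PySem.Str.lower (PySem.Str.strip kv.1)) = key
  generalize (PySem.Str.strip (if kv.2 = "" then "" else kv.2)) = v
  by_cases hmem : key ∈ pvAllowed
  · have hc : pvAllowed.contains key = true := by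
      simpa [List.contains_iff_mem] using hmem
    have hkeys : dA.keys = pvAllowed := by
      simp only [PySem.Dict.keys, h, List.map_map]
      exact List.map_congr_left (fun a _ => rfl) |>.trans (List.map_id _)
    have hcA : dA.contains key = true := by
      rw [PySem.Dict.contains_eq_decide_mem_keys, hkeys]; simpa using hmem
    rw [if_pos hc, PySem.Dict.items_insert_of_contains dA v hcA, h, List.map_map]
    refine List.map_congr_left ?_
    intro col _
    by_cases hcol : col = key
    · subst hcol
      simp
    · simp [Function.comp, hcol, beq_iff_eq, PySem.Dict.getD_insert]
  · have hc : pvAllowed.contains key = false := by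
      simpa [List.contains_iff_mem] using hmem
    rw [if_neg (by rw [hc]; exact Bool.false_ne_true), h]
    refine List.map_congr_left ?_
    intro col hcolmem
    have hne : col ≠ key := fun e => hmem (e ▸ hcolmem)
    rw [PySem.Dict.getD_insert_of_ne dB v "" hne]

theorem pv_fold (raw : List (String × String)) (dA dB : PySem.Dict String String)
    (h : dA.items = pvAllowed.map (fun col => (col, dB.getD col ""))) :
    (raw.foldl (fun d kv =>
        let key := PySem.Str.lower (PySem.Str.strip kv.1)
        if pvAllowed.contains key then
          d.insert key (PySem.Str.strip (if kv.2 = "" then "" else kv.2))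
        else d) dA).items
    = pvAllowed.map (fun col =>
        (col, (raw.foldl (fun d kv =>
            d.insert (PySem.Str.lower (PySem.Str.strip kv.1))
                     (PySem.Str.strip (if kv.2 = "" then "" else kv.2))) dB).getD col "")) := by
  induction raw generalizing dA dB with
  | nil => simpa using h
  | cons kv rest ih =>
    simp only [List.foldl_cons]
    exact ih _ _ (pv_step dA dB kv h)

-- ===== VERDICT (by name: the statement is the Claim_ definition above) =====
theorem row_to_canonical_py_spec : Claim_equal_row_to_canonical_py := by
  intro raw _
  show _ = _
  unfold row_to_canonical_py row_to_canonical_py_alt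
  rw [pv_fold raw _ PySem.Dict.empty (by decide)]
  refine List.map_congr_left fun col _ => ?_
  rw [pv_getD_eq_findD, pvFindD_empty_default]
  rfl
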